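-- pv_equiv track=rewrite | github.com/AdamZhouSE/pythonHomework | Code/CodeRecords/2535/60604/245646.py | spl
-- ===== SOURCE A (Python) =====
-- def spl(a):
--     l=len(a)
--     res=[]
--     for i in range(l-1):
--         tmp1=a[0:i+1]
--         tmp2=a[i+1:l]
--         tmp1.sort()
--         tmp2.sort()
--         if tmp1[-1]<=tmp2[0]:
--             res.append(i)
--     return res
-- ===== SOURCE B (Python) =====
-- def spl(a):
--     n = len(a)
--     if n < 2:
--         return []
--     suf = [0] * n
--     suf[n - 1] = a[n - 1]
--     for i in range(n - 2, -1, -1):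
--         suf[i] = min(a[i], suf[i + 1])
--     res = []
--     m = a[0]
--     for i in range(n - 1):
--         m = max(m, a[i])
--         if m <= suf[i + 1]:
--             res.append(i)
--     return res
-- ===== Notes on version B (the rewrite author's own statement) =====
-- stated objective: faster
-- what changed: Replaces sorting both slices at every split point with a suffix-min array built once and a running prefix max, one comparison per index.
import Mathlib
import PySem

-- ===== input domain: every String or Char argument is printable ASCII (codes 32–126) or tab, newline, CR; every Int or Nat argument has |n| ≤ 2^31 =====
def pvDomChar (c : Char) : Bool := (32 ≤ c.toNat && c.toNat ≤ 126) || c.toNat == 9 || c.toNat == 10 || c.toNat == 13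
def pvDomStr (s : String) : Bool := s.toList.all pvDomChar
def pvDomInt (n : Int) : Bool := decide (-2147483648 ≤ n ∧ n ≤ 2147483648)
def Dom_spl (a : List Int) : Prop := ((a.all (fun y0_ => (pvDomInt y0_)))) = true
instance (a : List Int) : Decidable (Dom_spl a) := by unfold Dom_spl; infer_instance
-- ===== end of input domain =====

-- B replaces per-index sorting of both slices by a suffix-min array and a running
-- prefix max (objective: faster, asymptotic).

-- ===== PORT A =====
def spl (a : List Int) : List Int :=
  let l : Int := a.length
  (PySem.List.pyRange 0 (l - 1) 1).foldl (fun res i =>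
    let tmp1 := PySem.List.sorted (PySem.List.slice a (some 0) (some (i + 1))) (fun x => x) false
    let tmp2 := PySem.List.sorted (PySem.List.slice a (some (i + 1)) (some l)) (fun x => x) false
    match PySem.List.pyGet? tmp1 (-1), PySem.List.pyGet? tmp2 0 with
    | some u, some v => if u ≤ v then res ++ [i] else res
    | _, _ => res) []

-- ===== PORT B =====
-- suffix-min array, built back to front as in Source B (suf[i] = min(a[i], suf[i+1]))
def splAltSuf : List Int → List Int
  | [] => []
  | [x] => [x]
  | x :: y :: t =>
    let s := splAltSuf (y :: t)
    min x (s.headD 0) :: s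

-- the forward loop of Source B: walks a and suf[1:] in step, running max m, index i
def splAltLoop : List Int → List Int → Int → Int → List Int
  | x :: xs, s :: st, i, m =>
    let m' := max m x
    (if m' ≤ s then [i] else []) ++ splAltLoop xs st (i + 1) m'
  | _, _, _, _ => []

def spl_alt (a : List Int) : List Int :=
  match a with
  | [] => []
  | [_] => []
  | x :: u => splAltLoop (x :: u) (splAltSuf u) 0 x

-- ===== PRECONDITION & SPEC =====
def Spec_spl (a : List Int) (out : List Int) : Prop := out = spl_alt a
instance (a : List Int) (out : List Int) : Decidable (Spec_spl a out) := by unfold Spec_spl; infer_instance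

-- ===== CLAIM (what is proved, stated in full; the proofs are below) =====
def Claim_equal_spl : Prop := ∀ (a : List Int), Dom_spl a → Spec_spl a (spl a)

-- ===== LEMMAS AND PROOFS =====

def maxOf : List Int → Int
  | [] => 0
  | x :: t => t.foldl max x

def minOf : List Int → Int
  | [] => 0
  | x :: t => t.foldl min x

-- reference function both ports are reduced to
def refSpl (a : List Int) : List Int :=
  (List.range (a.length - 1)).filterMap (fun k =>
    if maxOf (a.take (k + 1)) ≤ minOf (a.drop (k + 1)) then some ((k : Int)) else none)

lemma maxOf_mem (xs : List Int) (h : xs ≠ []) : maxOf xs ∈ xs := by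
  cases xs with
  | nil => exact absurd rfl h
  | cons x t =>
    simp only [maxOf]
    rcases PySem.List.foldl_max_mem t x with h' | h'
    · simp [h']
    · simp [h']

lemma le_maxOf (xs : List Int) : ∀ y ∈ xs, y ≤ maxOf xs := by
  cases xs with
  | nil => simp
  | cons x t =>
    intro y hy
    simp only [maxOf]
    rcases List.mem_cons.1 hy with rfl | hy'
    · exact (PySem.List.le_foldl_max t y).1
    · exact (PySem.List.le_foldl_max t x).2 y hy'

lemma minOf_mem (xs : List Int) (h : xs ≠ []) : minOf xs ∈ xs := by
  cases xs with
  | nil => exact absurd rfl h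
  | cons x t =>
    simp only [minOf]
    rcases PySem.List.foldl_min_mem t x with h' | h'
    · simp [h']
    · simp [h']

lemma minOf_le (xs : List Int) : ∀ y ∈ xs, minOf xs ≤ y := by
  cases xs with
  | nil => simp
  | cons x t =>
    intro y hy
    simp only [minOf]
    rcases List.mem_cons.1 hy with rfl | hy'
    · exact (PySem.List.foldl_min_le t y).1
    · exact (PySem.List.foldl_min_le t x).2 y hy'

lemma pairwise_le_last (s : List Int) (h : s ≠ []) (hp : s.Pairwise (· ≤ ·)) :
    ∀ y ∈ s, y ≤ s.getLast h := by
  induction s with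
  | nil => exact absurd rfl h
  | cons x t ih =>
    intro y hy
    cases t with
    | nil => simp at hy; simp [hy]
    | cons z w =>
      rcases List.mem_cons.1 hy with rfl | hy'
      · have := (List.pairwise_cons.1 hp).1
        have hlast : (z :: w).getLast (by simp) ∈ z :: w := List.getLast_mem _
        simpa [List.getLast_cons] using this _ hlast
      · have := ih (by simp) (List.pairwise_cons.1 hp).2 y hy'
        simpa [List.getLast_cons] using this

-- last element of sorted(xs) is the max of xs
lemma sorted_last_max (xs : List Int) (h : xs ≠ []) :
    PySem.List.pyGet? (PySem.List.sorted xs (fun x => x) false) (-1) = some (maxOf xs) := by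
  set s := PySem.List.sorted xs (fun x => x) false with hs
  have hperm : s.Perm xs := PySem.List.sorted_perm xs _ _
  have hsne : s ≠ [] := by
    intro hnil
    apply h
    have hl := hperm.length_eq
    rw [hnil] at hl
    exact List.length_eq_zero_iff.1 hl.symm
  rw [PySem.List.pyGet?_neg_one, List.getLast?_eq_some_getLast hsne]
  congr 1
  have hpw : s.Pairwise (· ≤ ·) := PySem.List.sorted_pairwise xs _
  have h1 : s.getLast hsne ≤ maxOf xs :=
    le_maxOf xs _ (hperm.subset (List.getLast_mem hsne))
  have h2 : maxOf xs ≤ s.getLast hsne :=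
    pairwise_le_last s hsne hpw _ (hperm.symm.subset (maxOf_mem xs h))
  exact le_antisymm h1 h2

-- head of sorted(xs) is the min of xs
lemma sorted_head_min (xs : List Int) (h : xs ≠ []) :
    PySem.List.pyGet? (PySem.List.sorted xs (fun x => x) false) 0 = some (minOf xs) := by
  set s := PySem.List.sorted xs (fun x => x) false with hs
  have hperm : s.Perm xs := PySem.List.sorted_perm xs _ _
  have hsne : s ≠ [] := by
    intro hnil
    apply h
    have hl := hperm.length_eq
    rw [hnil] at hl
    exact List.length_eq_zero_iff.1 hl.symm
  obtain ⟨m, t, hmt⟩ := List.exists_cons_of_ne_nil hsne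
  rw [hmt, PySem.List.pyGet?_zero_cons]
  congr 1
  have h1 : ∀ y ∈ xs, m ≤ y := PySem.List.key_head_sorted_le xs (fun x => x) (hs.symm.trans hmt)
  have h2 : minOf xs ≤ m := by
    apply minOf_le xs
    exact hperm.subset (by simp [hmt])
  exact le_antisymm (h1 _ (minOf_mem xs h)) h2

-- my own foldl congruence over members
lemma foldl_congr_mem' {α β : Type} (f g : β → α → β) (xs : List α)
    (h : ∀ b x, x ∈ xs → f b x = g b x) : ∀ init, xs.foldl f init = xs.foldl g init := by
  induction xs with
  | nil => intro init; rfl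
  | cons x t ih =>
    intro init
    simp only [List.foldl_cons]
    rw [h init x (by simp)]
    exact ih (fun b y hy => h b y (by simp [hy])) _

-- an append-accumulator fold is a filterMap
lemma foldl_if_filterMap (p : Nat → Bool) :
    ∀ (ks : List Nat) (init : List Int),
      ks.foldl (fun res k => if p k then res ++ [(k : Int)] else res) init
      = init ++ ks.filterMap (fun k => if p k then some ((k : Int)) else none) := by
  intro ks
  induction ks with
  | nil => simp
  | cons k ks ih =>
    intro init
    by_cases hp : p k <;> simp [hp, ih, List.append_assoc]

-- A = refSpl
lemma spl_eq_ref (a : List Int) : spl a = refSpl a := by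
  have hbody : ∀ (res : List Int) (k : Nat), k ∈ List.range (a.length - 1) →
      (fun res (i : Int) =>
        let tmp1 := PySem.List.sorted (PySem.List.slice a (some 0) (some (i + 1))) (fun x => x) false
        let tmp2 := PySem.List.sorted (PySem.List.slice a (some (i + 1)) (some (a.length : Int))) (fun x => x) false
        match PySem.List.pyGet? tmp1 (-1), PySem.List.pyGet? tmp2 0 with
        | some u, some v => if u ≤ v then res ++ [i] else res
        | _, _ => res) res ((k : Int))
      = (fun res (k : Nat) =>
          if decide (maxOf (a.take (k + 1)) ≤ minOf (a.drop (k + 1))) then res ++ [(k : Int)] else res) res k := by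
    intro res k hk
    have hk' : k < a.length - 1 := List.mem_range.1 hk
    have hcast1 : ((k : Int) + 1) = (((k + 1 : Nat) : Int)) := by push_cast; ring
    have hslice1 : PySem.List.slice a (some 0) (some ((k : Int) + 1)) = a.take (k + 1) := by
      rw [hcast1, PySem.List.slice_zero_start, PySem.List.slice_to_natCast]
    have hle2 : k + 1 ≤ a.length := by omega
    have hslice2 : PySem.List.slice a (some ((k : Int) + 1)) (some (a.length : Int)) = a.drop (k + 1) := by
      rw [hcast1]
      have hsplit : ((a.length : Int)) = (((k + 1 : Nat) : Int)) + (((a.length - (k + 1) : Nat) : Int)) := by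
        rw [Nat.cast_sub hle2]; ring
      rw [hsplit, PySem.List.slice_natCast_add]
      exact List.take_of_length_le (by simp)
    have h1ne : a.take (k + 1) ≠ [] := by
      apply List.ne_nil_of_length_pos
      rw [List.length_take]
      omega
    have h2ne : a.drop (k + 1) ≠ [] := by
      apply List.ne_nil_of_length_pos
      rw [List.length_drop]
      omega
    simp only [hslice1, hslice2, sorted_last_max _ h1ne, sorted_head_min _ h2ne]
    by_cases hle : maxOf (a.take (k + 1)) ≤ minOf (a.drop (k + 1)) <;> simp [hle]
  simp only [spl, refSpl]
  have hlen : ((a.length : Int) - 1).toNat = a.length - 1 := by omega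
  rw [PySem.List.pyRange_one]
  simp only [Int.sub_zero, hlen, zero_add]
  rw [List.foldl_map]
  rw [foldl_congr_mem' _
    (fun res (k : Nat) => if decide (maxOf (a.take (k + 1)) ≤ minOf (a.drop (k + 1))) then res ++ [(k : Int)] else res)
    (List.range (a.length - 1)) hbody []]
  rw [foldl_if_filterMap]
  simp

-- folding min from a combined seed pulls the first argument out
lemma foldl_min_pull (l : List Int) : ∀ a b : Int, l.foldl min (min a b) = min a (l.foldl min b) := by
  induction l with
  | nil => intro a b; rfl
  | cons c l ih =>
    intro a b
    simp only [List.foldl_cons]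
    rw [min_assoc]
    exact ih a (min b c)

lemma minOf_cons (x y : Int) (t : List Int) : minOf (x :: y :: t) = min x (minOf (y :: t)) := by
  simp only [minOf, List.foldl_cons]
  exact foldl_min_pull t x y

-- splAltSuf (x :: u) starts with the suffix minimum
lemma splAltSuf_cons (x : Int) (u : List Int) :
    splAltSuf (x :: u) = minOf (x :: u) :: splAltSuf u := by
  induction u generalizing x with
  | nil => rfl
  | cons y t ih =>
    rw [splAltSuf, ih y]
    simp only [List.headD_cons]
    rw [← ih y, minOf_cons]

-- the forward loop, characterised as a filterMap over the remaining indices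
lemma splAltLoop_spec :
    ∀ (u : List Int) (x0 m i : Int),
      splAltLoop (x0 :: u) (splAltSuf u) i m
      = (List.range u.length).filterMap (fun k =>
          if (u.take k).foldl max (max m x0) ≤ minOf (u.drop k) then some (i + (k : Int)) else none) := by
  intro u
  induction u with
  | nil => intro x0 m i; simp [splAltLoop, splAltSuf]
  | cons y t ih =>
    intro x0 m i
    rw [splAltSuf_cons, splAltLoop]
    rw [ih y (max m x0) (i + 1)]
    simp only [List.length_cons]
    rw [List.range_succ_eq_map, List.filterMap_cons, List.filterMap_map]
    have htail : List.filterMap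
        (fun k => if (t.take k).foldl max (max (max m x0) y) ≤ minOf (t.drop k)
                  then some (i + 1 + (k : Int)) else none) (List.range t.length)
      = List.filterMap ((fun k =>
          if ((y :: t).take k).foldl max (max m x0) ≤ minOf ((y :: t).drop k)
          then some (i + (k : Int)) else none) ∘ Nat.succ) (List.range t.length) := by
      apply List.filterMap_congr
      intro k _
      simp only [Function.comp, Nat.succ_eq_add_one, List.take_succ_cons, List.foldl_cons,
        List.drop_succ_cons]
      have hidx : i + ((k + 1 : Nat) : Int) = i + 1 + (k : Int) := by push_cast; ring
      rw [hidx]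
    rw [← htail]
    by_cases hc : (max m x0) ≤ minOf (y :: t)
    · simp [hc]
    · simp [hc]

-- B = refSpl
lemma spl_alt_eq_ref (a : List Int) : spl_alt a = refSpl a := by
  match a with
  | [] => simp [spl_alt, refSpl]
  | [x] => simp [spl_alt, refSpl]
  | x :: y :: t =>
    show splAltLoop (x :: y :: t) (splAltSuf (y :: t)) 0 x = refSpl (x :: y :: t)
    rw [splAltLoop_spec]
    unfold refSpl
    simp only [List.length_cons, Nat.add_sub_cancel]
    apply List.filterMap_congr
    intro k _
    have hmax : ((y :: t).take k).foldl max (max x x) = maxOf ((x :: y :: t).take (k + 1)) := by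
      rw [max_self, List.take_succ_cons]
      simp [maxOf]
    have hmin : minOf ((y :: t).drop k) = minOf ((x :: y :: t).drop (k + 1)) := by
      rw [List.drop_succ_cons]
    rw [hmax, hmin, zero_add]

-- ===== VERDICT (by name: the statement is the Claim_ definition above) =====
theorem spl_spec : Claim_equal_spl := by
  intro a _
  unfold Spec_spl
  rw [spl_eq_ref, spl_alt_eq_ref]
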